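-- pv_equiv track=rewrite | github.com/nyberry/TIMC-APP | src/pdf/handle_pdfs.py | identify_lab
-- ===== SOURCE A (Python) =====
-- def identify_lab(lines):
--     #figure out which lab we are dealing with
--     lab=None
--     # String to check for (convert to lowercase for case-insensitive search)
--     search_string1_AA = "AL Arabi Laboratory".lower()
--     search_string2_AA ="This electronic copy of your tests result has been finalized by the laboratory director".lower()
--     search_string_ML = "Authorized on :".lower()
--     # Check if the search stringS appear in any of the strings in the list (after converting to lowercase)
--     found_AA = False
--     if any(search_string1_AA in string.lower() for string in lines) or any (search_string2_AA in string.lower() for string in lines):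
--         found_AA = True
--     found_ML = any(search_string_ML in string.lower() for string in lines)
--     if found_AA:
--         lab = "Al Arabi"
--     elif found_ML:
--         lab = "ML"
--     return(lab)
-- ===== SOURCE B (Python) =====
-- def identify_lab(lines):
--     # One pass: lowercase each line once, return immediately on an Al Arabi marker,
--     # remember an ML marker and decide after the loop (priority AA over ML preserved).
--     aa1 = "al arabi laboratory"
--     aa2 = "this electronic copy of your tests result has been finalized by the laboratory director"
--     ml = "authorized on :"
--     found_ml = False
--     for line in lines:
--         low = line.lower()
--         if aa1 in low or aa2 in low:
--             return "Al Arabi"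
--         if ml in low:
--             found_ml = True
--     return "ML" if found_ml else None
-- ===== Notes on version B (the rewrite author's own statement) =====
-- stated objective: simpler
-- what changed: Replaced A's three separate any() scans (each lowercasing every line again) with one loop that lowercases each line once, returns 'Al Arabi' immediately on an AA marker and remembers an ML marker for after the loop.
import Mathlib
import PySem

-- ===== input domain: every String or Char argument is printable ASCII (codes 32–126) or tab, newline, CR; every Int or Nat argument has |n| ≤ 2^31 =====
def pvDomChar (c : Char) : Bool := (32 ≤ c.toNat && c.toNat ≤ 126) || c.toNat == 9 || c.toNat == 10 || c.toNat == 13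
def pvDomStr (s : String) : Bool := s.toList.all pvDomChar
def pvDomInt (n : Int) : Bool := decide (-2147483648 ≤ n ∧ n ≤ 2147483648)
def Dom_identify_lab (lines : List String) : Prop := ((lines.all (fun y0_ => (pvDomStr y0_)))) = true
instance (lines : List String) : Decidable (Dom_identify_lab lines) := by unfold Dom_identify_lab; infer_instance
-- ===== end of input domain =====

-- B: one pass over lines (lowercase each line once, early return on AA, ML flag after); simpler than A's three any() scans.


-- ===== PORT A =====
def identify_lab (lines : List String) : Option String :=
  let search_string1_AA := PySem.Str.lower "AL Arabi Laboratory"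
  let search_string2_AA := PySem.Str.lower "This electronic copy of your tests result has been finalized by the laboratory director"
  let search_string_ML := PySem.Str.lower "Authorized on :"
  let found_AA :=
    (lines.any (fun s => PySem.Str.isIn search_string1_AA (PySem.Str.lower s))) ||
    (lines.any (fun s => PySem.Str.isIn search_string2_AA (PySem.Str.lower s)))
  let found_ML := lines.any (fun s => PySem.Str.isIn search_string_ML (PySem.Str.lower s))
  if found_AA then some "Al Arabi"
  else if found_ML then some "ML"
  else none

-- ===== PORT B =====
-- One pass; early return on an AA marker, ML flag decided after the loop.
def identify_lab_alt_loop (foundML : Bool) : List String → Option String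
  | [] => if foundML then some "ML" else none
  | line :: rest =>
    let low := PySem.Str.lower line
    if PySem.Str.isIn "al arabi laboratory" low ||
       PySem.Str.isIn "this electronic copy of your tests result has been finalized by the laboratory director" low then
      some "Al Arabi"
    else identify_lab_alt_loop (foundML || PySem.Str.isIn "authorized on :" low) rest

def identify_lab_alt (lines : List String) : Option String :=
  identify_lab_alt_loop false lines

-- ===== PRECONDITION & SPEC =====
def Spec_identify_lab (lines : List String) (out : Option String) : Prop := out = identify_lab_alt lines
instance (lines : List String) (out : Option String) : Decidable (Spec_identify_lab lines out) := by unfold Spec_identify_lab; infer_instance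

-- ===== CLAIM (what is proved, stated in full; the proofs are below) =====
def Claim_equal_identify_lab : Prop := ∀ (lines : List String), Dom_identify_lab lines → Spec_identify_lab lines (identify_lab lines)

-- ===== LEMMAS AND PROOFS =====

theorem alt_loop_eq (lines : List String) (fML : Bool)
    (p1 p2 pm : String → Bool)
    (h1 : p1 = fun s => PySem.Str.isIn "al arabi laboratory" (PySem.Str.lower s))
    (h2 : p2 = fun s => PySem.Str.isIn "this electronic copy of your tests result has been finalized by the laboratory director" (PySem.Str.lower s))
    (hm : pm = fun s => PySem.Str.isIn "authorized on :" (PySem.Str.lower s)) :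
    identify_lab_alt_loop fML lines =
      if lines.any p1 || lines.any p2 then some "Al Arabi"
      else if fML || lines.any pm then some "ML" else none := by
  subst h1 h2 hm
  induction lines generalizing fML with
  | nil => simp [identify_lab_alt_loop]
  | cons l rest ih =>
    simp only [identify_lab_alt_loop, List.any_cons]
    by_cases hA : (PySem.Str.isIn "al arabi laboratory" (PySem.Str.lower l) ||
        PySem.Str.isIn "this electronic copy of your tests result has been finalized by the laboratory director" (PySem.Str.lower l)) = true
    · rw [if_pos hA]
      have hcond : ((PySem.Str.isIn "al arabi laboratory" (PySem.Str.lower l) ||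
            rest.any fun s => PySem.Str.isIn "al arabi laboratory" (PySem.Str.lower s)) ||
          (PySem.Str.isIn "this electronic copy of your tests result has been finalized by the laboratory director" (PySem.Str.lower l) ||
            rest.any fun s => PySem.Str.isIn "this electronic copy of your tests result has been finalized by the laboratory director" (PySem.Str.lower s))) = true := by
        rcases Bool.or_eq_true_iff.mp hA with h | h <;>
          simp only [h, Bool.true_or, Bool.or_true]
      rw [if_pos hcond]
    · rw [if_neg hA, ih]
      have hA' : (PySem.Str.isIn "al arabi laboratory" (PySem.Str.lower l) ||
          PySem.Str.isIn "this electronic copy of your tests result has been finalized by the laboratory director" (PySem.Str.lower l)) = false := by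
        simpa using hA
      rcases Bool.or_eq_false_iff.mp hA' with ⟨ha, hb⟩
      simp only [ha, hb, Bool.false_or, Bool.or_assoc]
      rfl

-- ===== VERDICT (by name: the statement is the Claim_ definition above) =====
theorem identify_lab_spec : Claim_equal_identify_lab := by
  intro lines _
  unfold Spec_identify_lab identify_lab identify_lab_alt
  rw [alt_loop_eq lines false _ _ _ rfl rfl rfl]
  rfl
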